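-- pv_equiv track=rewrite | github.com/CDCgov/oamd-bio-test-data | data/generic/reference-assets/varpipe/scripts/coverage_stats.py | get_region_coverage
-- ===== SOURCE A (Python) =====
-- def get_region_coverage(coverage_data, reference, start, stop):
--     """Obtain coverage data for a given region"""
--     total_coverage = 0
--     total_count = 0
--     total_coverage = 0
--     for position in range(start, stop + 1):
--         if position in coverage_data[reference]:
--             if coverage_data[reference][position] > 0:
--                 total_count += 1
--                 total_coverage += coverage_data[reference][position]
--     return ((stop - start + 1), total_count, total_coverage)
-- ===== SOURCE B (Python) =====
-- def get_region_coverage(coverage_data, reference, start, stop):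
--     """Obtain coverage data for a given region"""
--     total_count = 0
--     total_coverage = 0
--     if start <= stop:
--         for position, cov in coverage_data[reference].items():
--             if start <= position <= stop and cov > 0:
--                 total_count += 1
--                 total_coverage += cov
--     return ((stop - start + 1), total_count, total_coverage)
-- ===== Notes on version B (the rewrite author's own statement) =====
-- stated objective: idiomatic
-- what changed: B iterates once over the items of coverage_data[reference], filtering keys into [start, stop], instead of probing the dict at every position of range(start, stop+1); the empty-range guard keeps A's behaviour of never touching the dict when start > stop.
import Mathlib
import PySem

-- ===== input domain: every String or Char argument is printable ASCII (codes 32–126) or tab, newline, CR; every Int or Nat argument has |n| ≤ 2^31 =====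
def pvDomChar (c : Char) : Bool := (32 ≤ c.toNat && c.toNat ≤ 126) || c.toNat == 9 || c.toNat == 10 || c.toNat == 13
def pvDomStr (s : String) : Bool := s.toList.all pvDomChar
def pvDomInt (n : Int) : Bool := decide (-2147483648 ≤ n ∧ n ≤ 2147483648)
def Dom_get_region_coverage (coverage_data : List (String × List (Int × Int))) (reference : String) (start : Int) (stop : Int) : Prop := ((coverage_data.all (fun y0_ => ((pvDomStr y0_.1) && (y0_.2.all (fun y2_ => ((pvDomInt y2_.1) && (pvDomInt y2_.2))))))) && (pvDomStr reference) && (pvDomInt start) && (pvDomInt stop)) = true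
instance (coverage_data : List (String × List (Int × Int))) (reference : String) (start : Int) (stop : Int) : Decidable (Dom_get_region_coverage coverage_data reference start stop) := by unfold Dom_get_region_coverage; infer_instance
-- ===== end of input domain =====

-- B replaces A's probe of the dict at every position of range(start, stop+1) by a single
-- pass over the dict's items filtered into [start, stop] (objective: idiomatic).

-- ===== PORT A =====
-- for position in range(start, stop+1): if position in d: if d[position] > 0: count += 1; cov += d[position]
def get_region_coverage (coverage_data : List (String × List (Int × Int))) (reference : String) (start : Int) (stop : Int) : Int × Int × Int :=
  let r : Int × Int :=
    (PySem.List.pyRange start (stop + 1) 1).foldl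
      (fun st position =>
        -- coverage_data[reference]: first-match lookup; none = KeyError, excluded by Pre_ whenever the loop runs
        let d : List (Int × Int) := (coverage_data.lookup reference).getD []
        if (d.lookup position).isSome then
          if (d.lookup position).getD 0 > 0 then
            (st.1 + 1, st.2 + (d.lookup position).getD 0)
          else st
        else st) (0, 0)
  (stop - start + 1, r.1, r.2)

-- ===== PORT B =====
-- one pass over coverage_data[reference].items(), guarded so the dict is untouched on an empty range
def get_region_coverage_alt (coverage_data : List (String × List (Int × Int))) (reference : String) (start : Int) (stop : Int) : Int × Int × Int :=
  let totals : Int × Int :=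
    if start ≤ stop then
      ((coverage_data.lookup reference).getD []).foldl
        (fun st pv =>
          if start ≤ pv.1 ∧ pv.1 ≤ stop ∧ pv.2 > 0 then (st.1 + 1, st.2 + pv.2) else st)
        (0, 0)
    else (0, 0)
  (stop - start + 1, totals.1, totals.2)

-- ===== PRECONDITION & SPEC =====
-- Pre_ excludes (a) inputs where both Pythons raise KeyError (reference missing while the range
-- start..stop is nonempty) and (b) association lists with duplicate keys, which do not encode any
-- Python dict (a Python dict's keys are unique).
def Pre_get_region_coverage (coverage_data : List (String × List (Int × Int))) (reference : String) (start : Int) (stop : Int) : Prop :=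
  (coverage_data.map Prod.fst).Nodup ∧
  (∀ p ∈ coverage_data, (p.2.map Prod.fst).Nodup) ∧
  (stop < start ∨ (coverage_data.lookup reference).isSome)
instance (coverage_data : List (String × List (Int × Int))) (reference : String) (start : Int) (stop : Int) : Decidable (Pre_get_region_coverage coverage_data reference start stop) := by unfold Pre_get_region_coverage; infer_instance

def pvWitness_get_region_coverage : (List (String × List (Int × Int))) × String × Int × Int :=
  ([("chr1", [(1, 5), (2, 0), (4, 3)])], "chr1", 1, 3)

def Spec_get_region_coverage (coverage_data : List (String × List (Int × Int))) (reference : String) (start : Int) (stop : Int) (out : Int × Int × Int) : Prop := out = get_region_coverage_alt coverage_data reference start stop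
instance (coverage_data : List (String × List (Int × Int))) (reference : String) (start : Int) (stop : Int) (out : Int × Int × Int) : Decidable (Spec_get_region_coverage coverage_data reference start stop out) := by unfold Spec_get_region_coverage; infer_instance

-- ===== CLAIM (what is proved, stated in full; the proofs are below) =====
def Claim_equal_get_region_coverage : Prop := ∀ (coverage_data : List (String × List (Int × Int))) (reference : String) (start : Int) (stop : Int), Dom_get_region_coverage coverage_data reference start stop → Pre_get_region_coverage coverage_data reference start stop → Spec_get_region_coverage coverage_data reference start stop (get_region_coverage coverage_data reference start stop)

-- ===== LEMMAS AND PROOFS =====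

-- a value the lookup returns is an entry of the association list
theorem pv_mem_of_lookup {α : Type} {l : List (String × α)} {r : String} {d : α}
    (h : List.lookup r l = some d) : (r, d) ∈ l := by
  induction l with
  | nil => simp at h
  | cons x xs ih =>
    obtain ⟨a, b⟩ := x
    by_cases hx : (r == a) = true
    · have he : r = a := eq_of_beq hx
      subst he
      simp [List.lookup] at h
      simp [h]
    · simp only [List.lookup, hx] at h
      exact List.mem_cons_of_mem _ (ih h)

-- a fold that adds independent contributions to both components is a pair of map-sums
theorem pv_foldl_pair_add {α : Type} (L : List α) (g h : α → Int) (a b : Int) :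
    L.foldl (fun st x => (st.1 + g x, st.2 + h x)) (a, b) = (a + (L.map g).sum, b + (L.map h).sum) := by
  induction L generalizing a b with
  | nil => simp
  | cons x xs ih => simp [ih]; constructor <;> ring

-- summing 'if pos = p then c else 0' over a duplicate-free list is a membership test
theorem pv_sum_ite_eq {L : List Int} (hL : L.Nodup) (p : Int) (c : Int) :
    (L.map (fun pos => if pos = p then c else 0)).sum = if p ∈ L then c else 0 := by
  induction L with
  | nil => simp
  | cons x xs ih =>
    rcases List.nodup_cons.mp hL with ⟨hx, hxs⟩
    by_cases hxp : x = p
    · subst hxp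
      simp [ih hxs, hx]
    · simp [hxp, ih hxs, Ne.symm hxp]

-- the bridge: summing k over the dict probed at each position of a duplicate-free position
-- list equals summing over the dict's entries whose key lies in that list
theorem pv_lookup_sum (d : List (Int × Int)) (hd : (d.map Prod.fst).Nodup)
    (L : List Int) (hL : L.Nodup) (k : Option Int → Int) (hk : k none = 0) :
    (L.map (fun pos => k (d.lookup pos))).sum
      = (d.map (fun pv => if pv.1 ∈ L then k (some pv.2) else 0)).sum := by
  induction d with
  | nil => simp [hk]
  | cons pv rest ih =>
    obtain ⟨p, v⟩ := pv
    rcases List.nodup_cons.mp hd with ⟨hp, hrest⟩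
    have hlp : rest.lookup p = none := by
      rw [List.lookup_eq_none_iff]
      intro q hq
      simp only [bne_iff_ne, ne_eq]
      intro he
      apply hp
      rw [he]
      exact List.mem_map.mpr ⟨q, hq, rfl⟩
    have hsplit : ∀ pos : Int,
        k (((p, v) :: rest).lookup pos)
          = k (rest.lookup pos) + (if pos = p then k (some v) else 0) := by
      intro pos
      by_cases hpp : p = pos
      · subst hpp
        simp [hlp, hk]
      · have hb : (pos == p) = false := beq_eq_false_iff_ne.mpr (fun h => hpp h.symm)
        simp only [List.lookup, hb, if_neg (fun h : pos = p => hpp h.symm)]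
        simp
    calc (L.map (fun pos => k (((p, v) :: rest).lookup pos))).sum
        = (L.map (fun pos => k (rest.lookup pos) + (if pos = p then k (some v) else 0))).sum := by
          exact congrArg List.sum (List.map_congr_left (fun pos _ => hsplit pos))
      _ = (L.map (fun pos => k (rest.lookup pos))).sum
            + (L.map (fun pos => if pos = p then k (some v) else 0)).sum := by
          rw [← List.sum_map_add]
      _ = (rest.map (fun pv => if pv.1 ∈ L then k (some pv.2) else 0)).sum
            + (if p ∈ L then k (some v) else 0) := by
          rw [ih hrest, pv_sum_ite_eq hL]
      _ = (((p, v) :: rest).map (fun pv => if pv.1 ∈ L then k (some pv.2) else 0)).sum := by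
          simp; ring

-- the two per-entry counters used below
def pvKC : Option Int → Int  -- per-entry count contribution
  | some v => if v > 0 then 1 else 0
  | none => 0
def pvKS : Option Int → Int  -- per-entry coverage contribution
  | some v => if v > 0 then v else 0
  | none => 0

-- ===== VERDICT (by name: the statement is the Claim_ definition above) =====
theorem get_region_coverage_spec : Claim_equal_get_region_coverage := by
  intro coverage_data reference start stop _ hPre
  obtain ⟨_, hinner, hkey⟩ := hPre
  unfold Spec_get_region_coverage get_region_coverage get_region_coverage_alt
  by_cases hrange : start ≤ stop
  · -- nonempty range: reference is present by Pre_
    rcases hkey with h | h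
    · omega
    · obtain ⟨d, hdl⟩ := Option.isSome_iff_exists.mp h
      have hdnodup : (d.map Prod.fst).Nodup :=
        hinner _ (pv_mem_of_lookup hdl)
      simp only [hdl, Option.getD_some, if_pos hrange]
      -- rewrite A's loop body into the pair-add shape
      have hA : (fun (st : Int × Int) (position : Int) =>
            if (d.lookup position).isSome then
              if (d.lookup position).getD 0 > 0 then
                (st.1 + 1, st.2 + (d.lookup position).getD 0)
              else st
            else st)
          = fun st position =>
              (st.1 + pvKC (d.lookup position), st.2 + pvKS (d.lookup position)) := by
        funext st position
        cases hlp : d.lookup position with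
        | none => simp [pvKC, pvKS]
        | some v =>
          by_cases hv : v > 0 <;> simp [pvKC, pvKS, hv]
      -- rewrite B's loop body into the pair-add shape
      have hB : (fun (st : Int × Int) (pv : Int × Int) =>
            if start ≤ pv.1 ∧ pv.1 ≤ stop ∧ pv.2 > 0 then (st.1 + 1, st.2 + pv.2) else st)
          = fun st pv =>
              (st.1 + (if pv.1 ∈ PySem.List.pyRange start (stop + 1) 1 then pvKC (some pv.2) else 0),
               st.2 + (if pv.1 ∈ PySem.List.pyRange start (stop + 1) 1 then pvKS (some pv.2) else 0)) := by
        funext st pv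
        by_cases hm : pv.1 ∈ PySem.List.pyRange start (stop + 1) 1
        · have := (PySem.List.mem_pyRange_one (x := pv.1) (a := start) (b := stop + 1)).mp hm
          by_cases hv : pv.2 > 0
          · simp [hm, pvKC, pvKS, hv, this.1, (show pv.1 ≤ stop by omega)]
          · simp [hm, pvKC, pvKS, hv]
        · have hnot : ¬ (start ≤ pv.1 ∧ pv.1 ≤ stop ∧ pv.2 > 0) := by
            intro ⟨h1, h2, _⟩
            exact hm ((PySem.List.mem_pyRange_one).mpr ⟨h1, by omega⟩)
          simp [hm, hnot]
      rw [hA, hB, pv_foldl_pair_add, pv_foldl_pair_add,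
          pv_lookup_sum d hdnodup _ (PySem.List.nodup_pyRange_one _ _) (pvKC) rfl,
          pv_lookup_sum d hdnodup _ (PySem.List.nodup_pyRange_one _ _) (pvKS) rfl]
  · -- empty range: both loops contribute nothing
    have hnil : PySem.List.pyRange start (stop + 1) 1 = [] :=
      PySem.List.pyRange_one_eq_nil (by omega)
    simp only [hnil, List.foldl_nil, if_neg hrange]
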